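-- pv_equiv track=rewrite | github.com/Muhammadasif1986/ai-diven-book | backend/src/utils/text_processor.py | _find_word_end
-- ===== SOURCE A (Python) =====
-- def _find_word_end(text: str, start: int, end: int) -> int:
--     """
--     Find the best word boundary within the range [start, end].
--
--     Args:
--         text: The text to search
--         start: Start position to search from
--         end: End position to search to
--
--     Returns:
--         Position of word end, or -1 if not found
--     """
--     # Look for the last space or punctuation before the end
--     search_start = max(start, end - 100)  # Don't search too far back
--     search_text = text[search_start:end]
--
--     # Find the last word boundary
--     for i in range(len(search_text) - 1, -1, -1):
--         if search_text[i] in ' \t\n\r.,;:!?()[]{}"\'':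
--             actual_pos = search_start + i
--             if start < actual_pos < end:
--                 return actual_pos
--
--     return -1
-- ===== SOURCE B (Python) =====
-- _DELIMS = ' \t\n\r.,;:!?()[]{}"\''
--
--
-- def _find_word_end(text: str, start: int, end: int) -> int:
--     search_start = max(start, end - 100)
--     search_text = text[search_start:end]
--     lo = max(0, start - search_start + 1)
--     hi = max(0, end - search_start)
--     best = -1
--     for ch in _DELIMS:
--         best = max(best, search_text.rfind(ch, lo, hi))
--     return search_start + best if best != -1 else -1
-- ===== Notes on version B (the rewrite author's own statement) =====
-- stated objective: idiomatic
-- what changed: Replaces the hand-written backward character scan with early return by one library last-occurrence search (str.rfind with explicit window bounds) per delimiter character combined with max, after computing the valid index window [max(0,start-search_start+1), end-search_start) once.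
import Mathlib
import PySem

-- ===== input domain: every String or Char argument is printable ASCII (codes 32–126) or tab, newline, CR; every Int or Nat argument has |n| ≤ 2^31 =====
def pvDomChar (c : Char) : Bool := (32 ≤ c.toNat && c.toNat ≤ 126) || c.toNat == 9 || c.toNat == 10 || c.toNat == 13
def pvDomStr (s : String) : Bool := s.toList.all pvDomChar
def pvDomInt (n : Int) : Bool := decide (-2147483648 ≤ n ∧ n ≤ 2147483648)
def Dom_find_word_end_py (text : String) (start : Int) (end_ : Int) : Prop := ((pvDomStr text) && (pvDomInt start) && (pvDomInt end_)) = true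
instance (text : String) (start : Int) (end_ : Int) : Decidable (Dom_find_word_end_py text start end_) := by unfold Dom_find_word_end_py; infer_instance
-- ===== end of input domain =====

-- B replaces A's backward early-return scan by one str.rfind per delimiter over the
-- explicit valid window, combined with max (idiomatic; same result on every input).

-- ===== PORT A =====
-- the delimiter string ' \t\n\r.,;:!?()[]{}"\'' (shared literal of both Pythons)
def pvDelims : List Char := " \t\n\r.,;:!?()[]{}\"'".toList

-- A's loop: for i in range(len(search_text)-1, -1, -1), fuel k = i+1
def pvScanA (cs : List Char) (ss start end_ : Int) : Nat → Int
  | 0 => -1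
  | k+1 =>
    if (match cs[k]? with | some c => pvDelims.contains c | none => false) then
      -- actual_pos = search_start + i; return it iff start < actual_pos < end
      if start < ss + (k : Int) ∧ ss + (k : Int) < end_ then ss + (k : Int)
      else pvScanA cs ss start end_ k
    else pvScanA cs ss start end_ k

def find_word_end_py (text : String) (start : Int) (end_ : Int) : Int :=
  let search_start := max start (end_ - 100)
  let search_text := PySem.List.slice text.toList (some search_start) (some end_)
  pvScanA search_text search_start start end_ search_text.length

-- ===== PORT B =====
def find_word_end_py_alt (text : String) (start : Int) (end_ : Int) : Int :=
  let search_start := max start (end_ - 100)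
  let search_text := PySem.List.slice text.toList (some search_start) (some end_)
  let lo : Int := max 0 (start - search_start + 1)
  let hi : Int := max 0 (end_ - search_start)
  let best : Int := pvDelims.foldl
    (fun b c => max b (PySem.Chars.rfindFrom search_text [c] lo (some hi))) (-1)
  if best ≠ -1 then search_start + best else -1

-- ===== PRECONDITION & SPEC =====
def Spec_find_word_end_py (text : String) (start : Int) (end_ : Int) (out : Int) : Prop := out = find_word_end_py_alt text start end_
instance (text : String) (start : Int) (end_ : Int) (out : Int) : Decidable (Spec_find_word_end_py text start end_ out) := by unfold Spec_find_word_end_py; infer_instance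

-- ===== CLAIM (what is proved, stated in full; the proofs are below) =====
def Claim_equal_find_word_end_py : Prop := ∀ (text : String) (start : Int) (end_ : Int), Dom_find_word_end_py text start end_ → Spec_find_word_end_py text start end_ (find_word_end_py text start end_)

-- ===== LEMMAS AND PROOFS =====

-- the largest i < n with p i, as an Int (-1 if none)
def pvLast (p : Nat → Bool) : Nat → Int
  | 0 => -1
  | k+1 => if p k then (k : Int) else pvLast p k

theorem pvLast_ge (p : Nat → Bool) (n : Nat) : -1 ≤ pvLast p n := by
  induction n with
  | zero => simp [pvLast]
  | succ k ih => simp only [pvLast]; split <;> omega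

theorem pvLast_lt (p : Nat → Bool) (n : Nat) : pvLast p n < (n : Int) := by
  induction n with
  | zero => simp [pvLast]
  | succ k ih => simp only [pvLast]; split <;> push_cast <;> omega

theorem pvLast_congr (p q : Nat → Bool) (n : Nat) (h : ∀ i, i < n → p i = q i) :
    pvLast p n = pvLast q n := by
  induction n with
  | zero => rfl
  | succ k ih =>
    simp only [pvLast, h k (by omega)]
    rw [ih (fun i hi => h i (by omega))]

theorem pvLast_false (n : Nat) : pvLast (fun _ => false) n = -1 := by
  induction n with
  | zero => rfl
  | succ k ih => simpa [pvLast] using ih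

theorem pvLast_ext_above (p : Nat → Bool) (m n : Nat) (hmn : m ≤ n)
    (h : ∀ i, m ≤ i → p i = false) : pvLast p n = pvLast p m := by
  induction n with
  | zero => cases Nat.le_zero.mp hmn; rfl
  | succ k ih =>
    rcases Nat.lt_or_ge m (k+1) with hlt | hge
    · simp only [pvLast, h k (by omega)]
      simp only [Bool.false_eq_true, if_false]
      exact ih (by omega)
    · cases Nat.le_antisymm hmn hge; rfl

theorem pvLast_max (p q : Nat → Bool) (n : Nat) :
    max (pvLast p n) (pvLast q n) = pvLast (fun i => p i || q i) n := by
  induction n with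
  | zero => rfl
  | succ k ih =>
    have hp := pvLast_lt p k
    have hq := pvLast_lt q k
    simp only [pvLast]
    by_cases hpk : p k <;> by_cases hqk : q k <;>
      simp [hpk, hqk, ← ih] <;> omega

theorem pvLast_shift (P : Nat → Bool) (lo m : Nat) :
    pvLast (fun i => decide (lo ≤ i) && P i) (lo + m) =
      (if pvLast (fun j => P (lo + j)) m = -1 then -1
       else (lo : Int) + pvLast (fun j => P (lo + j)) m) := by
  induction m with
  | zero =>
    simp only [Nat.add_zero]
    rw [pvLast_congr _ (fun _ => false) lo (by intro i hi; simp; omega), pvLast_false]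
    simp [pvLast]
  | succ m ih =>
    have h1 : lo + (m+1) = (lo + m) + 1 := by omega
    rw [h1]
    simp only [pvLast]
    by_cases hP : P (lo + m) = true
    · have hm : ¬ ((m : Int) = -1) := by omega
      simp [hP, hm]
    · simp only [Bool.not_eq_true] at hP
      simpa [hP] using ih

-- [c].isPrefixOf l ↔ l[0]? = some c, as Bool on drop
theorem singleton_isPrefixOf (c : Char) (l : List Char) :
    [c].isPrefixOf l = (l[0]? == some c) := by
  cases l with
  | nil => rfl
  | cons a t => simp [List.isPrefixOf, BEq.comm]

theorem rfind_go_single (cs : List Char) (c : Char) (x : Nat) :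
    PySem.Chars.rfind.go cs [c] x = pvLast (fun j => cs[j]? == some c) (x+1) := by
  induction x with
  | zero =>
    simp only [PySem.Chars.rfind.go, pvLast]
    rw [show cs = cs.drop 0 from rfl, singleton_isPrefixOf]
    simp
  | succ j ih =>
    simp only [PySem.Chars.rfind.go]
    rw [singleton_isPrefixOf,
      show (cs.drop (j+1))[0]? = cs[j+1]? by simp [List.getElem?_drop], ih]
    conv_rhs => rw [pvLast]

theorem rfind_single (cs : List Char) (c : Char) :
    PySem.Chars.rfind cs [c] = pvLast (fun j => cs[j]? == some c) cs.length := by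
  rw [PySem.Chars.rfind, rfind_go_single]
  simp only [pvLast]
  simp

theorem rfindFrom_single (cs : List Char) (c : Char) (lo hi : Nat) :
    PySem.Chars.rfindFrom cs [c] (lo : Int) (some (hi : Int)) =
      pvLast (fun i => decide (lo ≤ i) && (cs[i]? == some c)) (min hi cs.length) := by
  simp only [PySem.Chars.rfindFrom]
  have hst : (if (lo : Int) < 0 then if (lo : Int) + cs.length < 0 then 0 else (lo : Int) + cs.length else (lo : Int)) = (lo : Int) := by
    split <;> omega
  have he : (if (cs.length : Int) < (hi : Int) then (cs.length : Int) else if (hi : Int) < 0 then if (hi : Int) + cs.length < 0 then 0 else (hi : Int) + cs.length else (hi : Int)) = ((min hi cs.length : Nat) : Int) := by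
    split <;> [skip; split] <;> push_cast <;> omega
  rw [hst, he]
  set e : Nat := min hi cs.length with hedef
  by_cases hle : (e : Int) < (lo : Int)
  · rw [if_pos hle]
    rw [pvLast_congr _ (fun _ => false) e ?_, pvLast_false]
    intro i hi2
    simp only [Bool.and_eq_false_iff]
    left
    simp only [decide_eq_false_iff_not]
    omega
  · rw [if_neg hle]
    have hloe : lo ≤ e := by omega
    have htn : (lo : Int).toNat = lo := by omega
    have hen : (e : Int).toNat = e := by omega
    rw [htn, hen, rfind_single]
    have hlen : ((cs.take e).drop lo).length = e - lo := by
      simp only [List.length_drop, List.length_take]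
      omega
    rw [hlen]
    have hcongr : pvLast (fun j => ((cs.take e).drop lo)[j]? == some c) (e - lo)
        = pvLast (fun j => cs[lo + j]? == some c) (e - lo) := by
      apply pvLast_congr
      intro j hj
      have : ((cs.take e).drop lo)[j]? = cs[lo + j]? := by
        rw [List.getElem?_drop, List.getElem?_take, if_pos (by omega)]
      rw [this]
    rw [hcongr]
    have := pvLast_shift (fun i => cs[i]? == some c) lo (e - lo)
    rw [show lo + (e - lo) = e from by omega] at this
    rw [this]

-- the fold of max over the delimiter characters
theorem foldl_max_rfind (D : List Char) (cs : List Char) (lo hi : Nat) (acc : Int)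
    (hacc : -1 ≤ acc) :
    D.foldl (fun b c => max b (PySem.Chars.rfindFrom cs [c] (lo : Int) (some (hi : Int)))) acc =
      max acc (pvLast (fun i => decide (lo ≤ i) &&
        (match cs[i]? with | some ch => D.contains ch | none => false)) (min hi cs.length)) := by
  induction D generalizing acc with
  | nil =>
    simp only [List.foldl_nil]
    rw [pvLast_congr _ (fun _ => false) _ (by intro i hi2; cases cs[i]? <;> simp), pvLast_false]
    omega
  | cons c D ih =>
    simp only [List.foldl_cons]
    rw [rfindFrom_single]
    have h1 : -1 ≤ max acc (pvLast (fun i => decide (lo ≤ i) && (cs[i]? == some c)) (min hi cs.length)) := by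
      have := pvLast_ge (fun i => decide (lo ≤ i) && (cs[i]? == some c)) (min hi cs.length)
      omega
    rw [ih _ h1, max_assoc, pvLast_max]
    congr 1
    apply pvLast_congr
    intro i hi2
    cases h : cs[i]? with
    | none => simp
    | some ch =>
      by_cases hlo : lo ≤ i
      · by_cases hce : ch = c
        · subst hce; simp [hlo]
        · simp [hlo, hce]
      · simp [hlo]

-- A's scan expressed through pvLast
theorem pvScanA_eq (cs : List Char) (ss start end_ : Int) (k : Nat) :
    pvScanA cs ss start end_ k =
      (if pvLast (fun i => (match cs[i]? with | some ch => pvDelims.contains ch | none => false)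
          && decide (start < ss + (i : Int)) && decide (ss + (i : Int) < end_)) k = -1 then -1
       else ss + pvLast (fun i => (match cs[i]? with | some ch => pvDelims.contains ch | none => false)
          && decide (start < ss + (i : Int)) && decide (ss + (i : Int) < end_)) k) := by
  induction k with
  | zero => rfl
  | succ k ih =>
    by_cases hd : (match cs[k]? with | some ch => pvDelims.contains ch | none => false) = true
    · by_cases hc : start < ss + (k : Int) ∧ ss + (k : Int) < end_
      · have hcond : ((match cs[k]? with | some ch => pvDelims.contains ch | none => false)
            && decide (start < ss + (k : Int)) && decide (ss + (k : Int) < end_)) = true := by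
          rw [hd]; simp [hc.1, hc.2]
        have hk : ¬((k : Int) = -1) := by omega
        simp only [pvScanA, pvLast, hcond, if_true]
        simp only [hd]
        simp [hc, hk]
      · have hcond : ((match cs[k]? with | some ch => pvDelims.contains ch | none => false)
            && decide (start < ss + (k : Int)) && decide (ss + (k : Int) < end_)) = false := by
          rcases not_and_or.mp hc with h | h <;> simp [h]
        simp only [pvScanA, pvLast, hcond, Bool.false_eq_true, if_false]
        rw [if_pos hd, if_neg hc]
        exact ih
    · have hcond : ((match cs[k]? with | some ch => pvDelims.contains ch | none => false)
          && decide (start < ss + (k : Int)) && decide (ss + (k : Int) < end_)) = false := by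
        simp only [Bool.and_eq_false_iff]
        left; left; simpa using hd
      simp only [pvScanA, pvLast, hcond, Bool.false_eq_true, if_false]
      rw [if_neg hd]
      exact ih

-- ===== VERDICT (by name: the statement is the Claim_ definition above) =====
theorem find_word_end_py_spec : Claim_equal_find_word_end_py := by
  intro text start end_ _
  unfold Spec_find_word_end_py find_word_end_py find_word_end_py_alt
  simp only []
  set ss := max start (end_ - 100) with hss
  set cs := PySem.List.slice text.toList (some ss) (some end_) with hcs
  set L := cs.length with hL
  -- B's integer bounds as naturals
  have hlo0 : (0:Int) ≤ max 0 (start - ss + 1) := le_max_left _ _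
  have hhi0 : (0:Int) ≤ max 0 (end_ - ss) := le_max_left _ _
  set loI : Int := max 0 (start - ss + 1) with hloI
  set hiI : Int := max 0 (end_ - ss) with hhiI
  set lo : Nat := loI.toNat with hlon
  set hi : Nat := hiI.toNat with hhin
  have hloc : (lo : Int) = loI := by omega
  have hhic : (hi : Int) = hiI := by omega
  rw [pvScanA_eq, ← hloc, ← hhic]
  rw [foldl_max_rfind pvDelims cs lo hi (-1) (by omega)]
  -- the two pvLast predicates agree after trimming A's range to min hi L
  have hq : pvLast (fun i => (match cs[i]? with | some ch => pvDelims.contains ch | none => false)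
      && decide (start < ss + (i : Int)) && decide (ss + (i : Int) < end_)) L
      = pvLast (fun i => decide (lo ≤ i) &&
        (match cs[i]? with | some ch => pvDelims.contains ch | none => false)) (min hi L) := by
    rw [pvLast_ext_above _ (min hi L) L (by omega) ?hfalse]
    · apply pvLast_congr
      intro i hiL
      have h1 : decide (start < ss + (i : Int)) = decide (lo ≤ i) := by
        by_cases h : lo ≤ i <;> simp [h] <;> omega
      have h2 : decide (ss + (i : Int) < end_) = true := by
        simp; omega
      rw [h1, h2]
      cases cs[i]? <;> simp [Bool.and_comm]
    case hfalse =>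
      intro i hiM
      by_cases hiL : i < L
      · have : ¬ (ss + (i : Int) < end_) := by
          have : hi ≤ i := by omega
          omega
        simp only [Bool.and_eq_false_iff]
        right; simpa using this
      · have : cs[i]? = none := by
          apply List.getElem?_eq_none; omega
        simp [this]
  rw [hq]
  have hge := pvLast_ge (fun i => decide (lo ≤ i) &&
      (match cs[i]? with | some ch => pvDelims.contains ch | none => false)) (min hi L)
  set r := pvLast (fun i => decide (lo ≤ i) &&
      (match cs[i]? with | some ch => pvDelims.contains ch | none => false)) (min hi L) with hr
  rw [max_eq_right hge]
  by_cases h : r = -1 <;> simp [h]
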